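-- pv_equiv track=rewrite | github.com/duilec/CS61A-spring2022 | exercise/mt2_review.py | digit_dict
-- ===== SOURCE A (Python) =====
-- def digit_dict(s):
--     """Map each digit d to the lists of elements in s that end with d.
--
--     >>> digit_dict([5, 8, 13, 21, 34, 55, 89])
--     {1: [21], 3: [13], 4: [34], 5: [5, 55], 8: [8], 9: [89]}
--     """
--     end_d_dict = {}
--     for i in range(10):
--         for val in s:
--             if val%10 == i:
--                 if end_d_dict.get(val%10):
--                     old_val = end_d_dict.pop(val%10)
--                     end_d_dict.update({i: old_val + [val] })
--                 else:
--                     end_d_dict.update({i: [val]})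
--     return end_d_dict
-- ===== SOURCE B (Python) =====
-- def digit_dict(s):
--     groups = {}
--     for v in s:
--         groups.setdefault(v % 10, []).append(v)
--     return {d: groups[d] for d in sorted(groups)}
-- ===== Notes on version B (the rewrite author's own statement) =====
-- stated objective: faster
-- what changed: B replaces A's ten passes over s (one per digit 0-9, each with a quadratic dict pop/re-insert-and-concatenate dance) by a single grouping pass over s appending into a dict keyed by v % 10, then emits the keys in sorted order.
import Mathlib
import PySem

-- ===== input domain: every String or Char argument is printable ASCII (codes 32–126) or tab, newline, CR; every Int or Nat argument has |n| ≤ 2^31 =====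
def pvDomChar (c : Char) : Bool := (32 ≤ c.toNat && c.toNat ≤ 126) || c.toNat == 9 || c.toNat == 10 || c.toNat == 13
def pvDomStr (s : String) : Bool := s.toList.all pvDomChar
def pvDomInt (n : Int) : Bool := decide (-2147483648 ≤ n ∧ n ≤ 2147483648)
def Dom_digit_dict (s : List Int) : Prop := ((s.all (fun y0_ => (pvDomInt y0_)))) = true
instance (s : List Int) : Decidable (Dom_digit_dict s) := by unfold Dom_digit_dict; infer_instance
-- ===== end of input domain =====

-- B groups in ONE pass over s with a dict keyed by v % 10 and then emits the keys in sorted order,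
-- instead of A's ten passes over s (one per digit) with a quadratic pop/re-insert-and-concatenate dance; objective: faster (measured).

-- ===== PORT A =====
-- truthiness of `end_d_dict.get(val%10)`: None and [] are falsy
def pvTruthy (o : Option (List Int)) : Bool :=
  match o with
  | some l => !l.isEmpty
  | none => false

def digit_dict (s : List Int) : List (Int × List Int) :=
  let end_d_dict : PySem.Dict Int (List Int) :=
    (PySem.List.pyRange 0 10 1).foldl (fun d i =>
      s.foldl (fun d val =>
        if PySem.Int.mod val 10 == i then
          if pvTruthy (d.get? (PySem.Int.mod val 10)) then
            match d.pop? (PySem.Int.mod val 10) with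
            | some (old_val, d') => d'.update [(i, old_val ++ [val])]
            | none => d  -- unreachable: the get just above was truthy
          else d.update [(i, [val])]
        else d) d) PySem.Dict.empty
  end_d_dict.items

-- ===== PORT B =====
def digit_dict_alt (s : List Int) : List (Int × List Int) :=
  -- groups.setdefault(v % 10, []).append(v)  ==  groups[v%10] = groups.get(v%10, []) + [v]  (PySem.Dict.modify)
  let groups : PySem.Dict Int (List Int) :=
    s.foldl (fun d v => d.modify (PySem.Int.mod v 10) [] (fun g => g ++ [v])) PySem.Dict.empty
  (PySem.List.sorted groups.keys (fun x => x) false).map (fun d => (d, groups.getD d []))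

-- ===== PRECONDITION & SPEC =====
def Spec_digit_dict (s : List Int) (out : List (Int × List Int)) : Prop := out = digit_dict_alt s
instance (s : List Int) (out : List (Int × List Int)) : Decidable (Spec_digit_dict s out) := by unfold Spec_digit_dict; infer_instance

-- ===== CLAIM (what is proved, stated in full; the proofs are below) =====
def Claim_equal_digit_dict : Prop := ∀ (s : List Int), Dom_digit_dict s → Spec_digit_dict s (digit_dict s)

-- ===== LEMMAS AND PROOFS =====

def pvF (s : List Int) (i : Int) : List Int := s.filter (fun v => PySem.Int.mod v 10 == i)

lemma pvMod_mem (v : Int) : PySem.Int.mod v 10 ∈ PySem.List.pyRange 0 10 1 := by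
  have h : PySem.Int.mod v 10 = v % 10 := by
    simp [PySem.Int.mod, Int.fmod_eq_emod]
  rw [PySem.List.mem_pyRange_one, h]
  exact ⟨Int.emod_nonneg v (by norm_num), Int.emod_lt_of_pos v (by norm_num)⟩

lemma pvIsEmpty_iff (s : List Int) (i : Int) :
    (pvF s i).isEmpty = true ↔ i ∉ s.map (fun v => PySem.Int.mod v 10) := by
  rw [List.isEmpty_iff, List.mem_map]
  unfold pvF
  rw [List.filter_eq_nil_iff]
  constructor
  · rintro h ⟨v, hv, e⟩
    exact h v hv (by simpa using e)
  · intro h v hv e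
    exact h ⟨v, hv, by simpa using e⟩

lemma pvFilterMap_eq (s : List Int) (l : List Int) :
    l.filterMap (fun i => if (pvF s i).isEmpty then none else some (i, pvF s i))
    = (l.filter (fun i => decide (i ∈ s.map (fun v => PySem.Int.mod v 10)))).map
        (fun i => (i, pvF s i)) := by
  induction l with
  | nil => rfl
  | cons a l ih =>
    rw [List.filterMap_cons, List.filter_cons]
    by_cases h : a ∈ s.map (fun v => PySem.Int.mod v 10)
    · have he : ¬ (pvF s a).isEmpty = true := fun hc => (pvIsEmpty_iff s a).mp hc h
      rw [if_neg he, if_pos (by simpa using h), List.map_cons, ih]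
    · have he : (pvF s a).isEmpty = true := (pvIsEmpty_iff s a).mpr h
      rw [if_pos he, if_neg (by simpa using h), ih]

def pvGroups (s : List Int) : PySem.Dict Int (List Int) :=
  s.foldl (fun d v => d.modify (PySem.Int.mod v 10) [] (fun g => g ++ [v])) PySem.Dict.empty

lemma pvGroups_eq_modify (s : List Int) :
    pvGroups s = (s.map (fun v => (PySem.Int.mod v 10, v))).foldl
      (fun d p => d.modify p.1 [] (fun x => x ++ [p.2])) PySem.Dict.empty := by
  rw [List.foldl_map]
  rfl

lemma pvGroups_getD (s : List Int) (c : Int) :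
    (pvGroups s).getD c [] = pvF s c := by
  rw [pvGroups_eq_modify, PySem.Dict.getD_foldl_modify_append]
  rw [List.filter_map, List.map_map]
  simp only [PySem.Dict.getD_empty, List.nil_append, Function.comp_def]
  rw [List.map_id']
  rfl

lemma pvGroups_keys (s : List Int) :
    (pvGroups s).keys = PySem.Set.ofList (s.map (fun v => PySem.Int.mod v 10)) := by
  have := PySem.Dict.keys_foldl_modify_key (s.map (fun v => (PySem.Int.mod v 10, v)))
    (fun p => p.1) [] (fun _ p x => x ++ [p.2]) PySem.Dict.empty
  rw [pvGroups_eq_modify]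
  rw [this]
  rw [PySem.Dict.keys_empty, PySem.Set.update_nil_left, List.map_map]
  rfl

lemma pvSorted_keys (s : List Int) :
    PySem.List.sorted (pvGroups s).keys (fun x => x) false
    = (PySem.List.pyRange 0 10 1).filter
        (fun i => decide (i ∈ s.map (fun v => PySem.Int.mod v 10))) := by
  rw [pvGroups_keys]
  apply PySem.List.sorted_eq_of_perm_of_pairwise_lt
  · apply (List.perm_ext_iff_of_nodup ?_ ?_).mpr
    · intro x
      rw [List.mem_filter, PySem.Set.mem_ofList, decide_eq_true_iff]
      constructor
      · rintro ⟨_, hx⟩; exact hx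
      · intro hx
        refine ⟨?_, hx⟩
        obtain ⟨v, _, hv⟩ := List.mem_map.mp hx
        exact hv ▸ pvMod_mem v
    · exact List.Nodup.filter _ (by decide)
    · exact PySem.Set.nodup_ofList _
  · exact List.Pairwise.filter _ (by decide)

lemma pvB_closed (s : List Int) :
    digit_dict_alt s = ((PySem.List.pyRange 0 10 1).filter
        (fun i => decide (i ∈ s.map (fun v => PySem.Int.mod v 10)))).map
      (fun i => (i, pvF s i)) := by
  show (PySem.List.sorted (pvGroups s).keys (fun x => x) false).map
      (fun d => (d, (pvGroups s).getD d [])) = _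
  rw [pvSorted_keys]
  simp only [pvGroups_getD]

lemma pvGet?_mk (prev rest : List (Int × List Int)) (i : Int)
    (hprev : ∀ p ∈ prev, (p.1 == i) = false) :
    (PySem.Dict.mk (prev ++ rest)).get? i = (PySem.Dict.mk rest).get? i := by
  simp only [PySem.Dict.get?, List.find?_append]
  rw [List.find?_eq_none.mpr (fun p hp => by simp [hprev p hp])]
  rfl

lemma pvContains_mk_false (prev : List (Int × List Int)) (i : Int)
    (hprev : ∀ p ∈ prev, (p.1 == i) = false) :
    (PySem.Dict.mk prev).contains i = false := by
  simp only [PySem.Dict.contains]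
  exact List.any_eq_false.mpr (fun p hp => by simp [hprev p hp])

lemma pvInsert_mk (prev : List (Int × List Int)) (i : Int) (v : List Int)
    (hprev : ∀ p ∈ prev, (p.1 == i) = false) :
    (PySem.Dict.mk prev).insert i v = PySem.Dict.mk (prev ++ [(i, v)]) := by
  simp only [PySem.Dict.insert, pvContains_mk_false prev i hprev]
  simp

lemma pvUpdate_single (d : PySem.Dict Int (List Int)) (i : Int) (v : List Int) :
    d.update [(i, v)] = d.insert i v := rfl

lemma pvErase_mk (prev : List (Int × List Int)) (i : Int) (cur : List Int)
    (hprev : ∀ p ∈ prev, (p.1 == i) = false) :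
    (PySem.Dict.mk (prev ++ [(i, cur)])).erase i = PySem.Dict.mk prev := by
  simp only [PySem.Dict.erase, List.filter_append]
  rw [List.filter_eq_self.mpr (fun p hp => by simp [hprev p hp])]
  simp

lemma pvInner (i : Int) (t : List Int) :
    ∀ (cur : List Int) (prev : List (Int × List Int)),
    (∀ p ∈ prev, (p.1 == i) = false) →
    t.foldl (fun d val =>
        if PySem.Int.mod val 10 == i then
          if pvTruthy (d.get? (PySem.Int.mod val 10)) then
            match d.pop? (PySem.Int.mod val 10) with
            | some (old_val, d') => d'.update [(i, old_val ++ [val])]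
            | none => d
          else d.update [(i, [val])]
        else d)
      (PySem.Dict.mk (prev ++ if cur.isEmpty then [] else [(i, cur)]))
    = PySem.Dict.mk (prev ++
        (if (cur ++ t.filter (fun v => PySem.Int.mod v 10 == i)).isEmpty then []
         else [(i, cur ++ t.filter (fun v => PySem.Int.mod v 10 == i))])) := by
  induction t with
  | nil => intro cur prev hprev; simp
  | cons v t ih =>
    intro cur prev hprev
    rw [List.foldl_cons, List.filter_cons]
    by_cases hv : (PySem.Int.mod v 10 == i) = true
    · have hvi : PySem.Int.mod v 10 = i := by simpa using hv
      simp only [hvi, beq_self_eq_true, if_true]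
      cases cur with
      | nil =>
        simp only [List.isEmpty_nil, if_true, List.append_nil]
        have h1 : (PySem.Dict.mk prev).get? i = none := by
          simp only [PySem.Dict.get?]
          rw [List.find?_eq_none.mpr (fun p hp => by simp [hprev p hp])]
          rfl
        rw [h1]
        simp only [pvTruthy, Bool.false_eq_true, if_false]
        rw [pvUpdate_single, pvInsert_mk prev i [v] hprev]
        have h2 := ih [v] prev hprev
        simp only [List.isEmpty_cons, Bool.false_eq_true, if_false, List.cons_append,
          List.nil_append] at h2 ⊢
        exact h2
      | cons c0 cur' =>
        simp only [List.isEmpty_cons, Bool.false_eq_true, if_false]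
        have h1 : (PySem.Dict.mk (prev ++ [(i, c0 :: cur')])).get? i = some (c0 :: cur') := by
          rw [pvGet?_mk prev _ i hprev]
          simp [PySem.Dict.get?]
        rw [h1]
        simp only [pvTruthy, List.isEmpty_cons, Bool.not_false, if_true]
        simp only [PySem.Dict.pop?, h1, Option.map_some]
        rw [pvErase_mk prev i _ hprev]
        rw [pvUpdate_single, pvInsert_mk prev i _ hprev]
        have h2 := ih ((c0 :: cur') ++ [v]) prev hprev
        simp only [List.isEmpty_cons, Bool.false_eq_true, if_false, List.cons_append,
          List.nil_append, List.append_assoc] at h2 ⊢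
        exact h2
    · simp only [hv, Bool.false_eq_true, if_false]
      exact ih cur prev hprev

lemma pvOuter (s : List Int) :
    ∀ (ds : List Int) (prev : List (Int × List Int)),
    ds.Nodup → (∀ i ∈ ds, ∀ p ∈ prev, (p.1 == i) = false) →
    ds.foldl (fun d i =>
      s.foldl (fun d val =>
        if PySem.Int.mod val 10 == i then
          if pvTruthy (d.get? (PySem.Int.mod val 10)) then
            match d.pop? (PySem.Int.mod val 10) with
            | some (old_val, d') => d'.update [(i, old_val ++ [val])]
            | none => d
          else d.update [(i, [val])]
        else d) d) (PySem.Dict.mk prev)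
    = PySem.Dict.mk (prev ++ ds.filterMap (fun i =>
        if (pvF s i).isEmpty then none else some (i, pvF s i))) := by
  intro ds
  induction ds with
  | nil => intro prev _ _; simp
  | cons i ds ih =>
    intro prev hnd hprev
    rw [List.foldl_cons, List.filterMap_cons]
    have hpi : ∀ p ∈ prev, (p.1 == i) = false := hprev i (by simp)
    have hstep := pvInner i s [] prev hpi
    simp only [List.isEmpty_nil, if_true, List.append_nil, List.nil_append] at hstep
    rw [show s.filter (fun v => PySem.Int.mod v 10 == i) = pvF s i from rfl] at hstep
    rw [hstep]
    have hids : i ∉ ds := (List.nodup_cons.mp hnd).1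
    have hnd' : ds.Nodup := (List.nodup_cons.mp hnd).2
    set E := (if (pvF s i).isEmpty then ([] : List (Int × List Int))
              else [(i, pvF s i)]) with hE
    have hprev' : ∀ j ∈ ds, ∀ p ∈ prev ++ E, (p.1 == j) = false := by
      intro j hj p hp
      rcases List.mem_append.mp hp with h | h
      · exact hprev j (by simp [hj]) p h
      · have hpE : p.1 = i := by
          rw [hE] at h
          split at h
          · simp at h
          · simp at h; rw [h]
        rw [hpE]
        simp only [beq_eq_false_iff_ne, ne_eq]
        intro he; rw [he] at hids; exact hids hj
    have := ih (prev ++ E) hnd' hprev'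
    rw [this, List.append_assoc]
    by_cases h : (pvF s i).isEmpty = true
    · rw [hE, if_pos h, if_pos h]
      simp
    · rw [hE, if_neg h, if_neg h]
      simp

lemma pvA_closed (s : List Int) :
    digit_dict s = (PySem.List.pyRange 0 10 1).filterMap (fun i =>
      if (pvF s i).isEmpty then none else some (i, pvF s i)) := by
  show ((PySem.List.pyRange 0 10 1).foldl _ PySem.Dict.empty).items = _
  rw [show (PySem.Dict.empty : PySem.Dict Int (List Int)) = PySem.Dict.mk [] from rfl]
  rw [pvOuter s (PySem.List.pyRange 0 10 1) [] (by decide) (by simp)]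
  rfl

-- ===== VERDICT (by name: the statement is the Claim_ definition above) =====
theorem digit_dict_spec : Claim_equal_digit_dict := by
  intro s _
  unfold Spec_digit_dict
  rw [pvA_closed, pvB_closed, pvFilterMap_eq]
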